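-- pv_equiv track=rewrite | github.com/TunaCici/Mhysa | Scripts/balance-local-files.py | load_balance
-- ===== SOURCE A (Python) =====
-- def load_balance(pairs : dict, people : int):
--     sorted_pairs = sorted(pairs.items(), key=lambda x:x[1], reverse=True)
--
--     people_files = [[] for _ in range(people)]
--     people_loads = [0] * people
--
--     for i in sorted_pairs:
--         min_loaded = people_loads.index(min(people_loads))
--
--         people_files[min_loaded].append(i)
--         people_loads[min_loaded] += (i[1])
--
--     return people_files, people_loads
-- ===== SOURCE B (Python) =====
-- def _insort(x, pq):
--     # insert x into the ascending-sorted list pq: binary-search the insertion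
--     # point (after any equal elements), then insert there
--     lo = 0
--     hi = len(pq)
--     while lo < hi:
--         mid = (lo + hi) // 2
--         if x < pq[mid]:
--             hi = mid
--         else:
--             lo = mid + 1
--     pq.insert(lo, x)
--     return pq
--
--
-- def load_balance(pairs : dict, people : int):
--     items = sorted(pairs.items(), key=lambda x: x[1], reverse=True)
--
--     files = [[] for _ in range(people)]
--     loads = [0] * people
--     # priority queue: (load, index) pairs kept in ascending order;
--     # its head is always the least-loaded person (smallest index on ties)
--     pq = [(0, i) for i in range(people)]
--
--     for it in items:
--         load, idx = pq[0]
--         nl = load + it[1]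
--         files[idx].append(it)
--         loads[idx] = nl
--         pq = _insort((nl, idx), pq[1:])
--
--     return files, loads
-- ===== Notes on version B (the rewrite author's own statement) =====
-- stated objective: faster
-- what changed: A rescans the whole loads list twice per item (min() then .index()); B instead maintains a priority queue of (load, index) pairs kept in ascending order, popping its head as the least-loaded person and reinserting the updated pair at a binary-searched position.
-- outside the precondition, e.g. on load_balance({'a': 1}, 0): A raises ValueError, B raises IndexError
import Mathlib
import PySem

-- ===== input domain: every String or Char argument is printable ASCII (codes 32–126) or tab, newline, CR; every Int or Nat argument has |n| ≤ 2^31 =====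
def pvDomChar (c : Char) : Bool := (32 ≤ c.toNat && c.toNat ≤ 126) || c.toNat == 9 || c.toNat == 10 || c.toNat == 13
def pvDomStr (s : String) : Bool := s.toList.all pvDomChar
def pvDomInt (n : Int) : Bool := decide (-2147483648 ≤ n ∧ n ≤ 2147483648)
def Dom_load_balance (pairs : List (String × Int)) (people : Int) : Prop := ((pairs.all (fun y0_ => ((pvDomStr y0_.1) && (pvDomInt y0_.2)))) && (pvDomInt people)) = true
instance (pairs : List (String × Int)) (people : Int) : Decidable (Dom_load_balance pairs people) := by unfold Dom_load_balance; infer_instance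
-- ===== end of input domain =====

-- B replaces A's per-item "min + index" double scan of the loads list by a priority queue:
-- a list of (load, index) pairs kept in ascending order, whose head is the least-loaded person.
-- Objective: faster (same asymptotics, measurably better constants: one pop + binary-searched insert per item instead of two full scans).


-- ===== PORT A =====
-- one iteration of A's loop: argmin of loads by min() + .index(), then append/add there
-- (the 'none' branches are unreachable under Pre_: Python raises ValueError on min([]))
def stepA (st : List (List (String × Int)) × List Int) (i : String × Int) :
    List (List (String × Int)) × List Int :=
  match PySem.List.min? st.2 (fun x => x) with
  | none => st
  | some m =>
    match PySem.List.index? st.2 m with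
    | none => st
    | some j => (st.1.set j (st.1.getD j [] ++ [i]), st.2.set j (st.2.getD j 0 + i.2))

def load_balance (pairs : List (String × Int)) (people : Int) :
    (List (List (String × Int))) × List Int :=
  let sorted_pairs := PySem.List.sorted ((PySem.Dict.ofList pairs).items) (fun x => x.2) true
  let people_files := (PySem.List.pyRange 0 people 1).map (fun _ => ([] : List (String × Int)))
  let people_loads := List.replicate people.toNat (0 : Int)
  sorted_pairs.foldl stepA (people_files, people_loads)

-- ===== PORT B =====
-- binary search for the insertion point in the ascending (Python tuple order) pq:
-- the while lo < hi loop of _insort; the fuel argument (≥ hi - lo, which the loop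
-- strictly decreases) only makes the recursion structural, it never runs out
def bisectR (x : Int × Int) (pq : List (Int × Int)) : Nat → Nat → Nat → Nat
  | 0, lo, _hi => lo
  | fuel + 1, lo, hi =>
    if lo < hi then
      let mid := (lo + hi) / 2
      let y := pq.getD mid (0, 0)
      if x.1 < y.1 ∨ (x.1 = y.1 ∧ x.2 < y.2) then bisectR x pq fuel lo mid
      else bisectR x pq fuel (mid + 1) hi
    else lo

-- _insort: find the insertion point, then pq.insert(lo, x)
def insortB (x : Int × Int) (pq : List (Int × Int)) : List (Int × Int) :=
  PySem.List.insert pq ((bisectR x pq pq.length 0 pq.length : Nat) : Int) x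

-- one iteration of B's loop: pop the pq head (least-loaded person), assign, reinsert
-- (the '[]' branch is unreachable under Pre_: Python raises IndexError on pq[0])
def stepB (st : List (List (String × Int)) × List Int × List (Int × Int)) (it : String × Int) :
    List (List (String × Int)) × List Int × List (Int × Int) :=
  match st.2.2 with
  | [] => st
  | (load, idx) :: rest =>
    let nl := load + it.2
    let k := idx.toNat
    (st.1.set k (st.1.getD k [] ++ [it]), st.2.1.set k nl, insortB (nl, idx) rest)

def load_balance_alt (pairs : List (String × Int)) (people : Int) :
    (List (List (String × Int))) × List Int :=
  let items := PySem.List.sorted ((PySem.Dict.ofList pairs).items) (fun x => x.2) true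
  let files := (PySem.List.pyRange 0 people 1).map (fun _ => ([] : List (String × Int)))
  let loads := List.replicate people.toNat (0 : Int)
  let pq := (PySem.List.pyRange 0 people 1).map (fun i => ((0 : Int), i))
  let r := items.foldl stepB (files, loads, pq)
  (r.1, r.2.1)

-- ===== PRECONDITION & SPEC =====
-- Pre_ excludes people ≤ 0 with a nonempty dict: there Python A raises ValueError (min of an
-- empty list) — and B raises IndexError — so A returns no value on the excluded inputs.
def Pre_load_balance (pairs : List (String × Int)) (people : Int) : Prop :=
  pairs = [] ∨ 1 ≤ people
instance (pairs : List (String × Int)) (people : Int) : Decidable (Pre_load_balance pairs people) := by unfold Pre_load_balance; infer_instance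

def pvWitness_load_balance : (List (String × Int)) × Int := ([("a", 3), ("b", 1), ("c", 2)], 2)

def Spec_load_balance (pairs : List (String × Int)) (people : Int) (out : (List (List (String × Int))) × List Int) : Prop := out = load_balance_alt pairs people
instance (pairs : List (String × Int)) (people : Int) (out : (List (List (String × Int))) × List Int) : Decidable (Spec_load_balance pairs people out) := by unfold Spec_load_balance; infer_instance

-- ===== CLAIM (what is proved, stated in full; the proofs are below) =====
def Claim_equal_load_balance : Prop := ∀ (pairs : List (String × Int)) (people : Int), Dom_load_balance pairs people → Pre_load_balance pairs people → Spec_load_balance pairs people (load_balance pairs people)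

-- ===== LEMMAS AND PROOFS =====

-- Python's '<' on int pairs (lexicographic)
def lexLt (a b : Int × Int) : Prop := a.1 < b.1 ∨ (a.1 = b.1 ∧ a.2 < b.2)

-- pq represents loads: strictly ascending, and its members are exactly the (loads[k], k)
def InvPQ (loads : List Int) (pq : List (Int × Int)) : Prop :=
  pq.Pairwise lexLt ∧
  ∀ p : Int × Int, p ∈ pq ↔ ∃ k : Nat, k < loads.length ∧ p.2 = (k : Int) ∧ loads[k]? = some p.1

-- proof-side structural version of _insort's result, and the bridge from the port
def insortL (x : Int × Int) : List (Int × Int) → List (Int × Int)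
  | [] => [x]
  | y :: ys =>
    if x.1 < y.1 ∨ (x.1 = y.1 ∧ x.2 < y.2) then x :: y :: ys else y :: insortL x ys

theorem mem_insortL (x p : Int × Int) (l : List (Int × Int)) :
    p ∈ insortL x l ↔ p = x ∨ p ∈ l := by
  induction l with
  | nil => simp [insortL]
  | cons y ys ih =>
    simp only [insortL]
    split
    · simp
    · simp [ih]; tauto

theorem lexLt_trans {a b c : Int × Int} (h1 : lexLt a b) (h2 : lexLt b c) : lexLt a c := by
  unfold lexLt at *; omega

theorem lexLt_total {a b : Int × Int} (h : a.2 ≠ b.2) : lexLt a b ∨ lexLt b a := by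
  unfold lexLt; omega

theorem pairwise_insortL (x : Int × Int) (l : List (Int × Int))
    (hl : l.Pairwise lexLt) (hne : ∀ z ∈ l, z.2 ≠ x.2) :
    (insortL x l).Pairwise lexLt := by
  induction l with
  | nil => simp [insortL]
  | cons y ys ih =>
    rcases List.pairwise_cons.mp hl with ⟨hy, hys⟩
    simp only [insortL]
    split
    · rename_i hxy
      refine List.pairwise_cons.mpr ⟨?_, hl⟩
      intro z hz
      rcases hz with _ | hz
      · exact hxy
      · exact lexLt_trans hxy (hy _ (by assumption))
    · rename_i hxy
      have hyx : lexLt y x := by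
        rcases lexLt_total (fun h => hne y (by simp) h.symm) with h | h
        · exact absurd h hxy
        · exact h
      refine List.pairwise_cons.mpr ⟨?_, ih hys (fun z hz => hne z (by simp [hz]))⟩
      intro z hz
      rcases (mem_insortL x z ys).mp hz with rfl | hz
      · exact hyx
      · exact hy _ hz

theorem bisectR_spec (x : Int × Int) (pq : List (Int × Int)) (fuel lo hi : Nat)
    (hfuel : hi - lo ≤ fuel) (hlh : lo ≤ hi) (hhl : hi ≤ pq.length)
    (hlo : ∀ i : Nat, i < lo → ¬ lexLt x (pq.getD i (0, 0)))
    (hhi : ∀ i : Nat, hi ≤ i → i < pq.length → lexLt x (pq.getD i (0, 0)))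
    (hmono : ∀ i j : Nat, i ≤ j → j < pq.length → lexLt x (pq.getD i (0, 0)) →
      lexLt x (pq.getD j (0, 0))) :
    bisectR x pq fuel lo hi ≤ pq.length ∧
    (∀ i : Nat, i < bisectR x pq fuel lo hi → ¬ lexLt x (pq.getD i (0, 0))) ∧
    (∀ i : Nat, bisectR x pq fuel lo hi ≤ i → i < pq.length → lexLt x (pq.getD i (0, 0))) := by
  induction fuel generalizing lo hi with
  | zero =>
    have hle : lo = hi := by omega
    subst hle
    simp only [bisectR]
    exact ⟨by omega, hlo, fun i h1 h2 => hhi i (by omega) h2⟩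
  | succ fuel ih =>
    simp only [bisectR]
    split
    · rename_i hlth
      split
      · rename_i hlt
        refine ih lo ((lo + hi) / 2) (by omega) (by omega) (by omega) hlo ?_
        intro i hmi hil
        exact hmono ((lo + hi) / 2) i hmi hil (by unfold lexLt; exact hlt)
      · rename_i hlt
        refine ih ((lo + hi) / 2 + 1) hi (by omega) (by omega) hhl ?_ hhi
        intro i hi1
        by_cases hic : i < lo
        · exact hlo i hic
        · intro hxi
          have hmlen : (lo + hi) / 2 < pq.length := by omega
          have hxm := hmono i ((lo + hi) / 2) (by omega) hmlen hxi
          unfold lexLt at hxm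
          exact hlt hxm
    · exact ⟨by omega, hlo, fun i h1 h2 => hhi i (by omega) h2⟩

theorem take_cons_drop_eq_insortL (x : Int × Int) (l : List (Int × Int)) (r : Nat)
    (hr : r ≤ l.length)
    (h1 : ∀ i : Nat, i < r → ¬ lexLt x (l.getD i (0, 0)))
    (h2 : ∀ i : Nat, r ≤ i → i < l.length → lexLt x (l.getD i (0, 0))) :
    l.take r ++ x :: l.drop r = insortL x l := by
  induction l generalizing r with
  | nil =>
    have : r = 0 := by simpa using hr
    subst this; rfl
  | cons y ys ih =>
    cases r with
    | zero =>
      have hy : lexLt x y := by simpa using h2 0 (by omega) (by simp)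
      unfold lexLt at hy
      simp [insortL, if_pos hy]
    | succ r =>
      have hy : ¬ lexLt x y := by simpa using h1 0 (by omega)
      unfold lexLt at hy
      simp only [List.take_succ_cons, List.drop_succ_cons, List.cons_append, insortL,
        if_neg hy]
      congr 1
      exact ih r (by simpa using hr)
        (fun i hi => by simpa using h1 (i + 1) (by omega))
        (fun i hi hil => by simpa using h2 (i + 1) (by omega) (by simpa using hil))

theorem insortB_eq_insortL (x : Int × Int) (pq : List (Int × Int))
    (hpair : pq.Pairwise lexLt) : insortB x pq = insortL x pq := by
  have hmono : ∀ i j : Nat, i ≤ j → j < pq.length → lexLt x (pq.getD i (0, 0)) →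
      lexLt x (pq.getD j (0, 0)) := by
    intro i j hij hjl hx
    rcases Nat.eq_or_lt_of_le hij with rfl | hij
    · exact hx
    · have := List.pairwise_iff_getElem.mp hpair i j (by omega) hjl hij
      have hi' : i < pq.length := by omega
      rw [List.getD_eq_getElem _ _ hi'] at hx
      rw [List.getD_eq_getElem _ _ hjl]
      exact lexLt_trans hx this
  obtain ⟨hle, h1, h2⟩ := bisectR_spec x pq pq.length 0 pq.length (by omega) (by omega) le_rfl
    (by omega) (by intro i h1 h2; omega) hmono
  unfold insortB
  rw [PySem.List.insert_natCast pq _ x hle]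
  exact take_cons_drop_eq_insortL x pq _ hle h1 h2

theorem head_facts (loads : List Int) (m j : Int) (rest : List (Int × Int))
    (hInv : InvPQ loads ((m, j) :: rest)) :
    0 ≤ j ∧ j.toNat < loads.length ∧ loads[j.toNat]? = some m ∧
    (∀ y ∈ loads, m ≤ y) ∧ (∀ k : Nat, k < j.toNat → loads[k]? ≠ some m) ∧
    (∀ p ∈ rest, p.2 ≠ j) := by
  obtain ⟨hpair, hmem⟩ := hInv
  obtain ⟨hd, htl⟩ := List.pairwise_cons.mp hpair
  obtain ⟨k0, hk0, hj0, hl0⟩ := (hmem (m, j)).mp (by simp)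
  simp only at hj0 hl0
  have hj0' : j.toNat = k0 := by omega
  have hrest : ∀ p ∈ rest, p.2 ≠ j := by
    intro p hp hpj
    obtain ⟨k, hk, hpk, hlk⟩ := (hmem p).mp (by simp [hp])
    have hkk : k = k0 := by omega
    have : p.1 = m := by
      subst hkk; rw [hl0] at hlk; exact (Option.some.inj hlk).symm
    have := hd p hp
    unfold lexLt at this
    omega
  refine ⟨by omega, by omega, by rw [hj0']; exact hl0, ?_, ?_, hrest⟩
  · intro y hy
    obtain ⟨k, hk, hky⟩ := List.mem_iff_getElem.mp hy
    have : (y, (k : Int)) ∈ (m, j) :: rest :=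
      (hmem (y, (k : Int))).mpr ⟨k, hk, rfl, by rw [List.getElem?_eq_getElem hk, hky]⟩
    rcases List.mem_cons.mp this with h | h
    · have : y = m := by exact congrArg Prod.fst h
      omega
    · have := hd _ h
      unfold lexLt at this
      simp only at this
      omega
  · intro k hk hload
    have : ((m : Int), (k : Int)) ∈ (m, j) :: rest :=
      (hmem (m, (k : Int))).mpr ⟨k, by omega, rfl, hload⟩
    rcases List.mem_cons.mp this with h | h
    · have : (k : Int) = j := congrArg Prod.snd h
      omega
    · have := hd _ h
      unfold lexLt at this
      simp only at this
      omega

theorem foldl_min_eq (t : List Int) (x m : Int) (hmem : m = x ∨ m ∈ t)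
    (hx : m ≤ x) (ht : ∀ y ∈ t, m ≤ y) : t.foldl min x = m := by
  induction t generalizing x with
  | nil => exact (hmem.resolve_right (by simp)).symm
  | cons y ys ih =>
    have hy : m ≤ y := ht y (by simp)
    have : m = min x y ∨ m ∈ ys := by
      rcases hmem with rfl | h
      · left; omega
      · rcases List.mem_cons.mp h with rfl | h
        · left; omega
        · right; exact h
    exact ih _ this (by omega) (fun z hz => ht z (by simp [hz]))

theorem min?_id_eq_of (xs : List Int) (m : Int) (hm : m ∈ xs) (hle : ∀ y ∈ xs, m ≤ y) :
    PySem.List.min? xs (fun x => x) = some m := by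
  cases xs with
  | nil => simp at hm
  | cons x t =>
    rw [PySem.List.min?_id_cons]
    have := foldl_min_eq t x m (List.mem_cons.mp hm)
      (hle x (by simp)) (fun y hy => hle y (by simp [hy]))
    simp [this]

theorem index?_eq_of (xs : List Int) (m : Int) (k : Nat) (hk : k < xs.length)
    (hkm : xs[k]? = some m) (hprev : ∀ j : Nat, j < k → xs[j]? ≠ some m) :
    PySem.List.index? xs m = some k := by
  rw [PySem.List.index?_eq_some_iff]
  refine ⟨xs.take k, xs.drop (k + 1), ?_, by simp [List.length_take]; omega, ?_⟩
  · have h1 : xs[k] = m := by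
      have := List.getElem?_eq_getElem hk
      rw [hkm] at this; exact (Option.some.injEq _ _).mp this.symm
    rw [← h1]
    rw [List.getElem_cons_drop]
    exact (List.take_append_drop k xs).symm
  · intro hmem
    rcases List.mem_take_iff_getElem.mp hmem with ⟨j, hj, hjm⟩
    exact hprev j (by omega) (by rw [List.getElem?_eq_getElem (by omega)]; simp [hjm])

theorem inv_step (loads : List Int) (m j : Int) (rest : List (Int × Int))
    (hInv : InvPQ loads ((m, j) :: rest)) (w : Int) :
    InvPQ (loads.set j.toNat (m + w)) (insortL (m + w, j) rest) := by
  obtain ⟨hj0, hjlen, hjm, _, _, hrest⟩ := head_facts loads m j rest hInv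
  obtain ⟨hpair, hmem⟩ := hInv
  obtain ⟨_, htl⟩ := List.pairwise_cons.mp hpair
  constructor
  · exact pairwise_insortL _ _ htl (fun z hz => by simpa using hrest z hz)
  · intro p
    rw [mem_insortL]
    constructor
    · rintro (rfl | hp)
      · exact ⟨j.toNat, by simpa using hjlen, by simp; omega,
          by rw [List.getElem?_set_self (by simpa using hjlen)]⟩
      · obtain ⟨k, hk, hpk, hlk⟩ := (hmem p).mp (by simp [hp])
        have hkj : k ≠ j.toNat := by
          have := hrest p hp; omega
        exact ⟨k, by simpa using hk, hpk, by rw [List.getElem?_set_ne (by omega)]; exact hlk⟩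
    · rintro ⟨k, hk, hpk, hlk⟩
      by_cases hkj : k = j.toNat
      · subst hkj
        rw [List.getElem?_set_self (by simpa using hjlen)] at hlk
        left
        have h1 : p.1 = m + w := (Option.some.inj hlk).symm
        have h2 : p.2 = j := by omega
        exact Prod.ext h1 h2
      · rw [List.getElem?_set_ne (by omega)] at hlk
        have hp : p ∈ (m, j) :: rest := (hmem p).mpr ⟨k, by simpa using hk, hpk, hlk⟩
        rcases List.mem_cons.mp hp with rfl | hp
        · exfalso; simp at hpk; omega
        · right; exact hp

theorem loop_eq (items : List (String × Int)) (files : List (List (String × Int)))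
    (loads : List Int) (pq : List (Int × Int)) (hne : loads ≠ [])
    (hInv : InvPQ loads pq) :
    items.foldl stepA (files, loads) =
      ((items.foldl stepB (files, loads, pq)).1, (items.foldl stepB (files, loads, pq)).2.1) := by
  induction items generalizing files loads pq with
  | nil => simp
  | cons it its ih =>
    have hlen : 0 < loads.length := List.length_pos_iff.mpr hne
    have h0 : (loads[0], (0 : Int)) ∈ pq :=
      (hInv.2 (loads[0], (0 : Int))).mpr ⟨0, hlen, rfl, List.getElem?_eq_getElem hlen⟩
    cases hpq : pq with
    | nil => rw [hpq] at h0; simp at h0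
    | cons hd rest =>
      obtain ⟨m, j⟩ := hd
      rw [hpq] at hInv
      obtain ⟨hj0, hjlen, hjm, hmin, hfirst, _⟩ := head_facts loads m j rest hInv
      have hmmem : m ∈ loads := List.mem_of_getElem? hjm
      have hminEq : PySem.List.min? loads (fun x => x) = some m := min?_id_eq_of loads m hmmem hmin
      have hidxEq : PySem.List.index? loads m = some j.toNat :=
        index?_eq_of loads m j.toNat hjlen hjm hfirst
      have hgetD : loads.getD j.toNat 0 = m := by
        rw [List.getD_eq_getElem?_getD, hjm]; rfl
      have hstepA : stepA (files, loads) it =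
          (files.set j.toNat (files.getD j.toNat [] ++ [it]), loads.set j.toNat (m + it.2)) := by
        simp only [stepA, hminEq, hgetD, hidxEq]
      have htl : rest.Pairwise lexLt := (List.pairwise_cons.mp hInv.1).2
      have hstepB : stepB (files, loads, (m, j) :: rest) it =
          (files.set j.toNat (files.getD j.toNat [] ++ [it]), loads.set j.toNat (m + it.2),
            insortL (m + it.2, j) rest) := by
        simp only [stepB]
        rw [insortB_eq_insortL _ _ htl]
      have hne' : loads.set j.toNat (m + it.2) ≠ [] := by
        rw [← List.length_pos_iff, List.length_set]
        omega
      simp only [List.foldl_cons, hstepA, hstepB]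
      exact ih _ _ _ hne' (inv_step loads m j rest hInv it.2)

theorem inv_init (people : Int) :
    InvPQ (List.replicate people.toNat 0)
      ((PySem.List.pyRange 0 people 1).map (fun i => ((0 : Int), i))) := by
  constructor
  · refine List.Pairwise.map _ ?_ (PySem.List.pairwise_lt_pyRange_one 0 people)
    intro a b hab
    right
    exact ⟨rfl, hab⟩
  · intro p
    simp only [List.mem_map, PySem.List.mem_pyRange_one]
    constructor
    · rintro ⟨i, ⟨hi0, hip⟩, rfl⟩
      refine ⟨i.toNat, by simp; omega, by simp; omega, ?_⟩
      rw [List.getElem?_replicate]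
      simp
      omega
    · rintro ⟨k, hk, hpk, hlk⟩
      rw [List.getElem?_replicate, if_pos (by simpa using hk)] at hlk
      refine ⟨(k : Int), by simp at hk; omega, ?_⟩
      have h1 : p.1 = 0 := (Option.some.inj hlk).symm
      exact (Prod.ext h1 hpk).symm

-- ===== VERDICT (by name: the statement is the Claim_ definition above) =====
theorem load_balance_spec : Claim_equal_load_balance := by
  intro pairs people _ hpre
  unfold Spec_load_balance load_balance load_balance_alt
  rcases hpre with h | h
  · subst h; rfl
  · have hne : List.replicate people.toNat (0 : Int) ≠ [] := by
      have : 0 < people.toNat := by omega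
      simp [List.replicate_eq_nil_iff]; omega
    exact loop_eq _ _ _ _ hne (inv_init people)
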